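-- pv_equiv track=rewrite | github.com/FlameFlameFlame/mesh-generator | generator/graph.py | _path_to_feat_indices
-- ===== SOURCE A (Python) =====
-- def _path_to_feat_indices(path, edge_to_feat):
--     """List of feat_idx in path traversal order (deduplicated, skipping virtual edges).
--
--     Unlike _path_to_edge_set, this preserves the order features appear along the
--     Dijkstra path from s1→s2, which is needed for correct chain assembly in the
--     profile endpoint and for geographically-ordered road segment export.
--     """
--     seen = set()
--     result = []
--     for u, v in zip(path, path[1:]):
--         fi = edge_to_feat.get((u, v), -1)
--         if fi >= 0 and fi not in seen:
--             seen.add(fi)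
--             result.append(fi)
--     return result
-- ===== SOURCE B (Python) =====
-- def _path_to_feat_indices(path, edge_to_feat):
--     first = {}
--     for i, (u, v) in enumerate(zip(path, path[1:])):
--         f = edge_to_feat.get((u, v), -1)
--         if f >= 0:
--             first.setdefault(f, i)
--     return sorted(first, key=first.get)
-- ===== Notes on version B (the rewrite author's own statement) =====
-- stated objective: alternative
-- what changed: Instead of A's single pass that appends to an ordered result guarded by a seen-set, B records each feature's first-occurrence position in a dict and reconstructs the order by sorting the features by that recorded position.
import Mathlib
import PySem

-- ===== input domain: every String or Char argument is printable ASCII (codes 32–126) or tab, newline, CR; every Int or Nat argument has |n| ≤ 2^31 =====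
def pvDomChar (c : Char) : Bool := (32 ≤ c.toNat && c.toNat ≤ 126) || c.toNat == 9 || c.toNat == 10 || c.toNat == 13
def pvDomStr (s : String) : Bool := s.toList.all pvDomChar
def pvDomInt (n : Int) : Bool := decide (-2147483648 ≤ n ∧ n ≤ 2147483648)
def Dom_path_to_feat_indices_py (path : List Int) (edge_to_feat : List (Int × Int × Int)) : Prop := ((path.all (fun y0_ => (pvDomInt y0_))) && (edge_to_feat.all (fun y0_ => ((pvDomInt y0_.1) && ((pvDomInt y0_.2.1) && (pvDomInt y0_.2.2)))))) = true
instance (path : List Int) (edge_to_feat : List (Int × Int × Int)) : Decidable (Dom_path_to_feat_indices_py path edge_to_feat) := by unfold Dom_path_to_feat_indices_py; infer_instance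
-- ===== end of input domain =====

-- B replaces A's single seen-set pass by a first-occurrence-position map plus a sort by that position (alternative algorithm; same values).

-- ===== PORT A =====
-- edge_to_feat.get((u, v), -1): first association-list entry with key (u, v), else -1
def getFeat (edge_to_feat : List (Int × Int × Int)) (u v : Int) : Int :=
  match edge_to_feat.find? (fun e => e.1 == u && e.2.1 == v) with
  | some e => e.2.2
  | none => -1

def path_to_feat_indices_py (path : List Int) (edge_to_feat : List (Int × Int × Int)) : List Int :=
  ((path.zip path.tail).foldl
    (fun (st : PySem.Set Int × List Int) uv =>
      let fi := getFeat edge_to_feat uv.1 uv.2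
      if decide (0 ≤ fi) && !(PySem.Set.contains st.1 fi) then
        (PySem.Set.add st.1 fi, st.2 ++ [fi])
      else st)
    (PySem.Set.empty, [])).2

-- ===== PORT B =====
def path_to_feat_indices_py_alt (path : List Int) (edge_to_feat : List (Int × Int × Int)) : List Int :=
  let first : PySem.Dict Int Int :=
    (PySem.List.enumerate (path.zip path.tail) 0).foldl
      (fun d p =>
        let f := getFeat edge_to_feat p.2.1 p.2.2
        if decide (0 ≤ f) then d.setdefault f p.1 else d)
      PySem.Dict.empty
  PySem.List.sorted first.keys (fun k => first.getD k 0) false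

-- ===== PRECONDITION & SPEC =====
def Spec_path_to_feat_indices_py (path : List Int) (edge_to_feat : List (Int × Int × Int)) (out : List Int) : Prop := out = path_to_feat_indices_py_alt path edge_to_feat
instance (path : List Int) (edge_to_feat : List (Int × Int × Int)) (out : List Int) : Decidable (Spec_path_to_feat_indices_py path edge_to_feat out) := by unfold Spec_path_to_feat_indices_py; infer_instance

-- ===== CLAIM (what is proved, stated in full; the proofs are below) =====
def Claim_equal_path_to_feat_indices_py : Prop := ∀ (path : List Int) (edge_to_feat : List (Int × Int × Int)), Dom_path_to_feat_indices_py path edge_to_feat → Spec_path_to_feat_indices_py path edge_to_feat (path_to_feat_indices_py path edge_to_feat)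

-- ===== LEMMAS AND PROOFS =====

-- A's loop over the edge pairs, under the invariant that the seen set equals the
-- result list, produces the same list as a guarded set-fold over the mapped values.
theorem loopA_pair_eq (ef : List (Int × Int × Int)) (l : List (Int × Int)) :
    ∀ r : List Int,
      (l.foldl
        (fun (st : PySem.Set Int × List Int) (uv : Int × Int) =>
          let fi := getFeat ef uv.1 uv.2
          if decide (0 ≤ fi) && !(PySem.Set.contains st.1 fi) then
            (PySem.Set.add st.1 fi, st.2 ++ [fi])
          else st)
        (r, r)).2
      = (l.map (fun uv => getFeat ef uv.1 uv.2)).foldl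
          (fun r fi => if decide (0 ≤ fi) then PySem.Set.add r fi else r) r := by
  induction l with
  | nil => intro r; rfl
  | cons uv t ih =>
    intro r
    simp only [List.foldl_cons, List.map_cons]
    generalize getFeat ef uv.1 uv.2 = f
    by_cases h0 : (0 : Int) ≤ f
    · by_cases hc : f ∈ r
      · have hadd : PySem.Set.add r f = r := by simp [PySem.Set.add, hc]
        rw [if_neg (by simp [hc]), if_pos (by simp [h0]), hadd]
        exact ih r
      · have hadd : PySem.Set.add r f = r ++ [f] := by simp [PySem.Set.add, hc]
        rw [if_pos (by simp [h0, hc]), if_pos (by simp [h0]), hadd]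
        exact ih (r ++ [f])
    · rw [if_neg (by simp [h0]), if_neg (by simp [h0])]
      exact ih r

-- B's dict-building loop: the keys evolve exactly like A's guarded set-fold.
theorem loopB_keys (ef : List (Int × Int × Int)) (l : List (Int × Int)) :
    ∀ (s : Int) (d : PySem.Dict Int Int),
      ((PySem.List.enumerate l s).foldl
        (fun d p =>
          let f := getFeat ef p.2.1 p.2.2
          if decide (0 ≤ f) then d.setdefault f p.1 else d) d).keys
      = (l.map (fun uv => getFeat ef uv.1 uv.2)).foldl
          (fun r fi => if decide (0 ≤ fi) then PySem.Set.add r fi else r) d.keys := by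
  induction l with
  | nil => intro s d; simp [PySem.List.enumerate]
  | cons uv t ih =>
    intro s d
    rw [PySem.List.enumerate_cons]
    simp only [List.foldl_cons, List.map_cons]
    generalize getFeat ef uv.1 uv.2 = f
    by_cases h0 : (0 : Int) ≤ f
    · rw [if_pos (by simp [h0]), if_pos (by simp [h0])]
      rw [ih (s + 1) (d.setdefault f s)]
      congr 1
      by_cases hc : d.contains f
      · rw [PySem.Dict.setdefault_of_contains _ _ hc]
        simp [PySem.Set.add, (PySem.Dict.contains_iff_mem_keys d f).mp hc]
      · rw [PySem.Dict.setdefault_of_not_contains _ _ (by simpa using hc)]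
        rw [PySem.Dict.keys_insert_of_not_contains _ _ (by simpa using hc)]
        have : f ∉ d.keys := fun h => hc ((PySem.Dict.contains_iff_mem_keys d f).mpr h)
        simp [PySem.Set.add, this]
    · rw [if_neg (by simp [h0]), if_neg (by simp [h0])]
      exact ih (s + 1) d

-- B's dict-building loop preserves: keys nodup, item values strictly increasing,
-- and all values below the running index.
theorem loopB_inv (ef : List (Int × Int × Int)) (l : List (Int × Int)) :
    ∀ (s : Int) (d : PySem.Dict Int Int),
      d.keys.Nodup →
      (∀ p ∈ d.items, p.2 < s) →
      d.items.Pairwise (fun a b => a.2 < b.2) →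
      (((PySem.List.enumerate l s).foldl
        (fun d p =>
          let f := getFeat ef p.2.1 p.2.2
          if decide (0 ≤ f) then d.setdefault f p.1 else d) d).keys.Nodup ∧
       ((PySem.List.enumerate l s).foldl
        (fun d p =>
          let f := getFeat ef p.2.1 p.2.2
          if decide (0 ≤ f) then d.setdefault f p.1 else d) d).items.Pairwise (fun a b => a.2 < b.2)) := by
  induction l with
  | nil => intro s d h1 _ h3; simp [PySem.List.enumerate]; exact ⟨h1, h3⟩
  | cons uv t ih =>
    intro s d h1 h2 h3
    rw [PySem.List.enumerate_cons]
    simp only [List.foldl_cons]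
    generalize getFeat ef uv.1 uv.2 = f
    by_cases h0 : (0 : Int) ≤ f
    · rw [if_pos (by simp [h0])]
      by_cases hc : d.contains f
      · rw [PySem.Dict.setdefault_of_contains _ _ hc]
        exact ih (s + 1) d h1 (fun p hp => lt_trans (h2 p hp) (by omega)) h3
      · rw [PySem.Dict.setdefault_of_not_contains _ _ (by simpa using hc)]
        apply ih (s + 1)
        · rw [PySem.Dict.keys_insert_of_not_contains _ _ (by simpa using hc)]
          refine List.Nodup.append h1 (List.nodup_singleton f) ?_
          intro x hx hx'
          simp only [List.mem_singleton] at hx'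
          exact hc ((PySem.Dict.contains_iff_mem_keys d f).mpr (hx' ▸ hx))
        · intro p hp
          rw [PySem.Dict.items_insert_of_not_contains _ _ (by simpa using hc)] at hp
          rcases List.mem_append.mp hp with h | h
          · exact lt_trans (h2 p h) (by omega)
          · simp at h; subst h; omega
        · rw [PySem.Dict.items_insert_of_not_contains _ _ (by simpa using hc)]
          refine List.pairwise_append.mpr ⟨h3, List.pairwise_singleton _ _, ?_⟩
          intro p hp q hq
          simp at hq; subst hq
          exact h2 p hp
    · rw [if_neg (by simp [h0])]
      exact ih (s + 1) d h1 (fun p hp => lt_trans (h2 p hp) (by omega)) h3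

theorem path_to_feat_indices_spec_aux (path : List Int) (edge_to_feat : List (Int × Int × Int)) :
    path_to_feat_indices_py path edge_to_feat = path_to_feat_indices_py_alt path edge_to_feat := by
  unfold path_to_feat_indices_py path_to_feat_indices_py_alt
  set D := (PySem.List.enumerate (path.zip path.tail) 0).foldl
      (fun d p =>
        let f := getFeat edge_to_feat p.2.1 p.2.2
        if decide (0 ≤ f) then d.setdefault f p.1 else d)
      PySem.Dict.empty with hD
  obtain ⟨hnd, hpw⟩ := loopB_inv edge_to_feat (path.zip path.tail) 0 PySem.Dict.empty
    (by simp [PySem.Dict.empty, PySem.Dict.keys]) (by simp [PySem.Dict.empty]) (by simp [PySem.Dict.empty])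
  -- the sort by first position is the identity on D.keys
  have hgetD : ∀ p ∈ D.items, D.getD p.1 0 = p.2 := by
    intro p hp
    exact PySem.Dict.getD_of_mem_items _ hp hnd 0
  have hkeyspw : D.keys.Pairwise (fun a b => D.getD a 0 < D.getD b 0) := by
    have : D.items.Pairwise (fun a b => D.getD a.1 0 < D.getD b.1 0) := by
      refine List.Pairwise.imp_of_mem ?_ hpw
      intro a b ha hb hab
      rw [hgetD a ha, hgetD b hb]; exact hab
    have hk : D.keys = D.items.map (·.1) := rfl
    rw [hk]
    exact List.pairwise_map.mpr this
  have hsorted : PySem.List.sorted D.keys (fun k => D.getD k 0) false = D.keys :=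
    PySem.List.sorted_eq_of_perm_of_pairwise_lt _ _ _ (List.Perm.refl _) hkeyspw
  show (List.foldl _ ((([] : List Int), ([] : List Int))) (path.zip path.tail)).2 = _
  rw [loopA_pair_eq, hsorted, loopB_keys]
  rfl

-- ===== VERDICT (by name: the statement is the Claim_ definition above) =====
theorem path_to_feat_indices_py_spec : Claim_equal_path_to_feat_indices_py := by
  intro path edge_to_feat _
  unfold Spec_path_to_feat_indices_py
  exact path_to_feat_indices_spec_aux path edge_to_feat
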